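-- pv_equiv track=rewrite | github.com/karu2003/pico_ppm | integer_divisors.py | decompose_cycles
-- ===== SOURCE A (Python) =====
-- def decompose_cycles(n, max_val=31):
--     best_error = float('inf')
--     best_combo = None
--
--     for a in range(0, max_val + 1):          # Внешний цикл
--         for b in range(1, max_val + 1):      # Внутренний цикл
--             for c in range(0, 32):           # Остаточные такты: строго 5 бит → [0, 31]
--                 total = a * b + c
--                 error = abs(n - total)
--                 if error < best_error:
--                     best_error = error
--                     best_combo = (a, b, c)
--                     if error == 0:
--                         return best_combo, 0  # Точное попадание
--
--     return best_combo, best_error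
-- ===== SOURCE B (Python) =====
-- def decompose_cycles(n, max_val=31):
--     best_error = float('inf')
--     best_combo = None
--
--     for a in range(0, max_val + 1):
--         for b in range(1, max_val + 1):
--             p = a * b
--             # best residual c in [0, 31] is the clamp of n - p, found in O(1)
--             d = n - p
--             c = 0 if d < 0 else (31 if d > 31 else d)
--             error = abs(n - (p + c))
--             if error < best_error:
--                 best_error = error
--                 best_combo = (a, b, c)
--                 if error == 0:
--                     return best_combo, 0
--
--     return best_combo, best_error
-- ===== Notes on version B (the rewrite author's own statement) =====
-- stated objective: faster
-- what changed: The inner 32-iteration c-loop is replaced by an O(1) closed-form: the optimal residual c is the clamp of n - a*b into [0,31], which is also the first c the original scan would settle on.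
-- outside the precondition, e.g. on decompose_cycles(100, 0): A returns (None, inf), B returns (None, inf)
import Mathlib
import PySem

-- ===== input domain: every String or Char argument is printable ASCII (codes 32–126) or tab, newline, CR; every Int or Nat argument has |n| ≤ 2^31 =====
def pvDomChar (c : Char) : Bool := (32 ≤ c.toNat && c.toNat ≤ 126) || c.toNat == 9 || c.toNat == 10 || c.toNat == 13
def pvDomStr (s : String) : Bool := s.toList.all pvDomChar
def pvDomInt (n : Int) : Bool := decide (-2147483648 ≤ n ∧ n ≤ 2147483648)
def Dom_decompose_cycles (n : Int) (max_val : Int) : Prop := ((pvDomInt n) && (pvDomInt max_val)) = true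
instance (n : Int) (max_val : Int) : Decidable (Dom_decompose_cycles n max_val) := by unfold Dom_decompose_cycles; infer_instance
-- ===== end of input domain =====

-- B replaces A's inner 32-iteration c-loop by the O(1) clamp of n - a*b into [0, 31] (objective: faster, constant factor).

-- ===== PORT A =====
-- best = some (best_combo, best_error); none stands for (None, float('inf')).
-- Each 'for x in range(lo, stop)' is a counter recursion (Python's range is lazy);
-- Sum.inr models the early 'return' breaking out of all loops.
def pvBest : Type := Option ((Int × Int × Int) × Int)

-- 'error < best_error', with best_error = inf when no best yet
def pvBetter (err : Int) (best : pvBest) : Bool :=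
  match best with
  | none => true
  | some (_, e) => err < e

-- 'for c in range(0, 32): ...' (A's innermost loop), entered at c
def pvLoopC (n a b : Int) (c : Int) (best : pvBest) : pvBest ⊕ ((Int × Int × Int) × Int) :=
  if hc : c < 32 then
    let total := a * b + c
    let error := |n - total|
    if pvBetter error best then
      if error == 0 then Sum.inr ((a, b, c), 0)
      else pvLoopC n a b (c + 1) (some ((a, b, c), error))
    else pvLoopC n a b (c + 1) best
  else Sum.inl best
termination_by (32 - c).toNat
decreasing_by all_goals omega

-- 'for b in range(1, max_val + 1): ...', entered at b, stop = max_val + 1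
def pvLoopB (n a stop : Int) (b : Int) (best : pvBest) : pvBest ⊕ ((Int × Int × Int) × Int) :=
  if _hb : b < stop then
    match pvLoopC n a b 0 best with
    | Sum.inl best' => pvLoopB n a stop (b + 1) best'
    | Sum.inr r => Sum.inr r
  else Sum.inl best
termination_by (stop - b).toNat
decreasing_by all_goals omega

-- 'for a in range(0, max_val + 1): ...', entered at a, stop = max_val + 1
def pvLoopA (n stop : Int) (a : Int) (best : pvBest) : pvBest ⊕ ((Int × Int × Int) × Int) :=
  if _ha : a < stop then
    match pvLoopB n a stop 1 best with
    | Sum.inl best' => pvLoopA n stop (a + 1) best'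
    | Sum.inr r => Sum.inr r
  else Sum.inl best
termination_by (stop - a).toNat
decreasing_by all_goals omega

def decompose_cycles (n : Int) (max_val : Int) : (Int × Int × Int) × Int :=
  match pvLoopA n (max_val + 1) 0 none with
  | Sum.inr r => r
  | Sum.inl (some (combo, err)) => (combo, err)
  | Sum.inl none => ((0, 0, 0), 0)   -- Python returns (None, float('inf')) here; excluded by Pre_

-- ===== PORT B =====
-- B's b-loop: no c-loop, the optimal residual c is the clamp of n - a*b into [0, 31]
def pvLoopB' (n a stop : Int) (b : Int) (best : pvBest) : pvBest ⊕ ((Int × Int × Int) × Int) :=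
  if _hb : b < stop then
    let p := a * b
    let d := n - p
    let c := if d < 0 then 0 else if d > 31 then 31 else d
    let error := |n - (p + c)|
    if pvBetter error best then
      if error == 0 then Sum.inr ((a, b, c), 0)
      else pvLoopB' n a stop (b + 1) (some ((a, b, c), error))
    else pvLoopB' n a stop (b + 1) best
  else Sum.inl best
termination_by (stop - b).toNat
decreasing_by all_goals omega

def pvLoopA' (n stop : Int) (a : Int) (best : pvBest) : pvBest ⊕ ((Int × Int × Int) × Int) :=
  if _ha : a < stop then
    match pvLoopB' n a stop 1 best with
    | Sum.inl best' => pvLoopA' n stop (a + 1) best'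
    | Sum.inr r => Sum.inr r
  else Sum.inl best
termination_by (stop - a).toNat
decreasing_by all_goals omega

def decompose_cycles_alt (n : Int) (max_val : Int) : (Int × Int × Int) × Int :=
  match pvLoopA' n (max_val + 1) 0 none with
  | Sum.inr r => r
  | Sum.inl (some (combo, err)) => (combo, err)
  | Sum.inl none => ((0, 0, 0), 0)

-- ===== PRECONDITION & SPEC =====
-- Pre_ excludes max_val ≤ 0: there the loops never run and the Python returns (None, float('inf')),
-- which is not a value of the declared return type (Int × Int × Int) × Int.
def Pre_decompose_cycles (n : Int) (max_val : Int) : Prop := 1 ≤ max_val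
instance (n : Int) (max_val : Int) : Decidable (Pre_decompose_cycles n max_val) := by unfold Pre_decompose_cycles; infer_instance
def pvWitness_decompose_cycles : Int × Int := (100, 5)

def Spec_decompose_cycles (n : Int) (max_val : Int) (out : (Int × Int × Int) × Int) : Prop := out = decompose_cycles_alt n max_val
instance (n : Int) (max_val : Int) (out : (Int × Int × Int) × Int) : Decidable (Spec_decompose_cycles n max_val out) := by unfold Spec_decompose_cycles; infer_instance

-- ===== CLAIM (what is proved, stated in full; the proofs are below) =====
def Claim_equal_decompose_cycles : Prop := ∀ (n : Int) (max_val : Int), Dom_decompose_cycles n max_val → Pre_decompose_cycles n max_val → Spec_decompose_cycles n max_val (decompose_cycles n max_val)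

-- ===== LEMMAS AND PROOFS =====

-- B's per-(a,b) step, with the clamp floor generalized from 0 to lo
def pvStepG (n a b lo : Int) (best : pvBest) : pvBest ⊕ ((Int × Int × Int) × Int) :=
  let d := n - a * b
  let c := if d < lo then lo else if d > 31 then 31 else d
  let error := |n - (a * b + c)|
  if pvBetter error best then
    if error == 0 then Sum.inr ((a, b, c), 0)
    else Sum.inl (some ((a, b, c), error))
  else Sum.inl best

-- A's whole c-loop entered at c = lo IS the closed-form step with floor lo
theorem pvLoopC_eq_stepG (k : Nat) : ∀ (lo : Int), lo + k = 32 → 1 ≤ k → 0 ≤ lo →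
    ∀ (n a b : Int) (best : pvBest),
      pvLoopC n a b lo best = pvStepG n a b lo best := by
  induction k with
  | zero => intro lo _ hk; omega
  | succ k ih =>
    intro lo hlo _ hlo0 n a b best
    have hlt : lo < 32 := by omega
    rw [pvLoopC]
    rw [dif_pos hlt]
    rcases Nat.eq_zero_or_pos k with hk0 | hkpos
    · -- last iteration: lo = 31, the recursive calls at 32 stop, and the clamp with floor 31 is 31
      have h31 : lo = 31 := by omega
      subst h31
      have h32 : ∀ best : pvBest, pvLoopC n a b (31 + 1) best = Sum.inl best := by
        intro best; rw [pvLoopC]; norm_num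
      have hc : (if n - a * b < 31 then (31:Int) else if n - a * b > 31 then 31 else n - a * b) = 31 := by
        split_ifs <;> omega
      simp only [h32, pvStepG]
      rw [hc]
    · have hrec := ih (lo + 1) (by omega) hkpos (by omega) n a b
      simp only [hrec]
      by_cases hcase : n - a * b ≤ lo
      · -- the clamp is already lo; at floor lo+1 the error grows by 1, never an improvement
        have herr : |n - (a * b + lo)| = lo - (n - a * b) := by rw [abs_of_nonpos (by omega)]; ring
        have herr1 : |n - (a * b + (lo + 1))| = lo - (n - a * b) + 1 := by rw [abs_of_nonpos (by omega)]; ring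
        have hc : (if n - a * b < lo then lo else if n - a * b > 31 then 31 else n - a * b) = lo := by
          split_ifs <;> omega
        have hc1 : (if n - a * b < lo + 1 then lo + 1 else if n - a * b > 31 then 31 else n - a * b) = lo + 1 := by
          split_ifs <;> omega
        simp only [pvStepG]
        rw [hc, hc1]
        cases hb : pvBetter |n - (a * b + lo)| best with
        | true =>
          simp only [if_true]
          by_cases hz : |n - (a * b + lo)| = 0
          · simp [hz]
          · have hnb : pvBetter |n - (a * b + (lo + 1))| (some ((a, b, lo), |n - (a * b + lo)|)) = false := by
              simp [pvBetter, herr, herr1]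
            simp [hz, hnb]
        | false =>
          rcases best with _ | ⟨combo, E⟩
          · simp [pvBetter] at hb
          · have hE : E ≤ lo - (n - a * b) := by simp [pvBetter, herr] at hb; omega
            have hnb1 : pvBetter |n - (a * b + (lo + 1))| (some (combo, E)) = false := by
              simp [pvBetter, herr1]; omega
            simp [hnb1]
      · -- n - a*b ≥ lo + 1: floors lo and lo+1 clamp to the same c*, whose error beats the error at lo
        have hc_eq : (if n - a * b < lo then lo else if n - a * b > 31 then 31 else n - a * b)
            = (if n - a * b < lo + 1 then lo + 1 else if n - a * b > 31 then 31 else n - a * b) := by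
          split_ifs <;> omega
        have herrlo : |n - (a * b + lo)| = (n - a * b) - lo := by rw [abs_of_nonneg (by omega)]; ring
        simp only [pvStepG]
        rw [hc_eq]
        set cstar := if n - a * b < lo + 1 then lo + 1 else if n - a * b > 31 then 31 else n - a * b with hcstar
        have hcb : lo + 1 ≤ cstar ∧ cstar ≤ n - a * b := by rw [hcstar]; split_ifs <;> omega
        have herrstar : |n - (a * b + cstar)| = (n - a * b) - cstar := by rw [abs_of_nonneg (by omega)]; ring
        cases hb : pvBetter |n - (a * b + lo)| best with
        | true =>
          have hz : ¬ (|n - (a * b + lo)| = 0) := by rw [herrlo]; omega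
          have hnb : pvBetter |n - (a * b + cstar)| (some ((a, b, lo), |n - (a * b + lo)|)) = true := by
            simp [pvBetter, herrlo, herrstar]; omega
          have hbb : pvBetter |n - (a * b + cstar)| best = true := by
            rcases best with _ | ⟨combo, E⟩
            · simp [pvBetter]
            · simp [pvBetter, herrlo] at hb ⊢; rw [herrstar]; omega
          simp [hz, hnb, hbb]
        | false => simp

-- A's b-loop equals B's b-loop from any entry point
theorem pvLoopB_eq (n a stop : Int) (k : Nat) : ∀ (b : Int) (best : pvBest), (stop - b).toNat = k →
    pvLoopB n a stop b best = pvLoopB' n a stop b best := by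
  induction k with
  | zero =>
    intro b best hk
    have hge : ¬ (b < stop) := by omega
    rw [pvLoopB, pvLoopB', dif_neg hge, dif_neg hge]
  | succ k ih =>
    intro b best hk
    have hblt : b < stop := by omega
    have h := pvLoopC_eq_stepG 32 0 (by norm_num) (by norm_num) (by norm_num) n a b best
    have hsplit : pvLoopB' n a stop b best =
        (match pvStepG n a b 0 best with
          | Sum.inl best' => pvLoopB' n a stop (b + 1) best'
          | Sum.inr r => Sum.inr r) := by
      rw [pvLoopB', dif_pos hblt]
      simp only [pvStepG]
      split_ifs <;> rfl
    rw [hsplit, pvLoopB, dif_pos hblt]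
    simp only [h]
    cases pvStepG n a b 0 best with
    | inl best' => exact ih (b + 1) best' (by omega)
    | inr r => rfl

-- and so does the a-loop
theorem pvLoopA_eq (n stop : Int) (k : Nat) : ∀ (a : Int) (best : pvBest), (stop - a).toNat = k →
    pvLoopA n stop a best = pvLoopA' n stop a best := by
  induction k with
  | zero =>
    intro a best hk
    have hge : ¬ (a < stop) := by omega
    rw [pvLoopA, pvLoopA', dif_neg hge, dif_neg hge]
  | succ k ih =>
    intro a best hk
    have halt : a < stop := by omega
    rw [pvLoopA, pvLoopA', dif_pos halt, dif_pos halt,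
      pvLoopB_eq n a stop ((stop - 1).toNat) 1 best (by omega)]
    cases pvLoopB' n a stop 1 best with
    | inl best' => exact ih (a + 1) best' (by omega)
    | inr r => rfl

-- ===== VERDICT (by name: the statement is the Claim_ definition above) =====
theorem decompose_cycles_spec : Claim_equal_decompose_cycles := by
  intro n max_val _ _
  unfold Spec_decompose_cycles decompose_cycles decompose_cycles_alt
  rw [pvLoopA_eq n (max_val + 1) ((max_val + 1).toNat) 0 none (by omega)]
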